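-- pv_equiv track=rewrite | github.com/bcgov/namex | solr-synonyms-api/synonyms/utils/service_utils.py | list_distinctive_descriptive
-- ===== SOURCE A (Python) =====
-- import collections
--
-- def list_distinctive_descriptive(name_list, dist_list, desc_list):
--     queue_dist = collections.deque(dist_list)
--
--     if dist_list == name_list:
--         queue_dist.pop()
--
--     dist_list_tmp, dist_list_all, desc_list_tmp, desc_list_all = [], [], [], []
--
--     dist_list_tmp.append(list(queue_dist))
--
--     while len(queue_dist) > 1:
--         queue_dist.pop()
--         dist_list_tmp.append(list(queue_dist))
--
--     dist_list_tmp.reverse()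
--
--     for dist in dist_list_tmp:
--         desc_list_tmp.append([i for i in name_list if i not in dist and i in desc_list])
--
--     # Validate generation of list of lists of distinctives and descriptives with the correct combinations:
--     for idx, element in enumerate(dist_list_tmp):
--         if (dist_list_tmp[idx] + desc_list_tmp[idx]) == name_list:
--             dist_list_all.append(dist_list_tmp[idx])
--             desc_list_all.append(desc_list_tmp[idx])
--
--     return dist_list_all, desc_list_all
-- ===== SOURCE B (Python) =====
-- def list_distinctive_descriptive(name_list, dist_list, desc_list):
--     # Incremental single pass: grow the distinctive prefix one word at a time while
--     # shrinking a maintained descriptive candidate list (no re-filtering of name_list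
--     # per prefix), and validate each split against name_list's own head/tail at that
--     # length instead of concatenating.
--     eff = dist_list[:-1] if dist_list == name_list else dist_list
--     desc = [w for w in name_list if w in desc_list]
--     if not eff:
--         return ([[]], [desc]) if desc == name_list else ([], [])
--     dist_all, desc_all = [], []
--     dist = []
--     for w in eff:
--         dist = dist + [w]
--         desc = [x for x in desc if x != w]
--         if dist == name_list[:len(dist)] and desc == name_list[len(dist):]:
--             dist_all.append(dist)
--             desc_all.append(desc)
--     return dist_all, desc_all
-- ===== Notes on version B (the rewrite author's own statement) =====
-- stated objective: faster
-- what changed: Replaces A's deque-pop/reverse prefix materialisation and its two follow-up passes (re-filtering name_list from scratch for every prefix, then a concatenation check) with a single incremental pass that grows the distinctive prefix one word at a time while shrinking a maintained descriptive candidate list, validating each split against name_list's head/tail at that length.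
import Mathlib
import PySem

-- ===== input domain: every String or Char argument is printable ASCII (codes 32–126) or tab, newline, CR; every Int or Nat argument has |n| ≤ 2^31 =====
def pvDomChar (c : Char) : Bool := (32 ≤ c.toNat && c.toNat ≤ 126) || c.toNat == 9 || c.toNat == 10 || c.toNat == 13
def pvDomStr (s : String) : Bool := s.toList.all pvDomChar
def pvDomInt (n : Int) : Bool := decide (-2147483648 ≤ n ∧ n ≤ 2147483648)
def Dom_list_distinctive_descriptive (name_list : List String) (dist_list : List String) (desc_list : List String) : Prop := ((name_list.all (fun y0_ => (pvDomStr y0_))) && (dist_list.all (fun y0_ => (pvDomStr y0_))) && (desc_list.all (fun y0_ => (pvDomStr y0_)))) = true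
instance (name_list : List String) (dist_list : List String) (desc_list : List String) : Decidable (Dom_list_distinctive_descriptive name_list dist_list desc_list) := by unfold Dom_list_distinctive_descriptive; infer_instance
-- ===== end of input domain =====

-- B replaces A's deque/reverse prefix materialisation and its two follow-up passes with one
-- incremental pass that shrinks a maintained descriptive candidate list instead of re-filtering per prefix (objective: faster, measured).

-- ===== PORT A =====
-- the 'while len(queue_dist) > 1: queue_dist.pop(); dist_list_tmp.append(list(queue_dist))' loop
def pvAWhile (q : List String) (tmp : List (List String)) : List (List String) :=
  if q.length > 1 then pvAWhile q.dropLast (tmp ++ [q.dropLast]) else tmp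
termination_by q.length
decreasing_by simp [List.length_dropLast]; omega

def list_distinctive_descriptive (name_list : List String) (dist_list : List String) (desc_list : List String) : List (List String) × List (List String) :=
  -- queue_dist = deque(dist_list); if dist_list == name_list: queue_dist.pop()
  -- (on the excluded empty/empty input Python raises IndexError here; dropLast is the popped deque otherwise)
  let q := if dist_list == name_list then dist_list.dropLast else dist_list
  -- dist_list_tmp.append(list(queue_dist)); while-loop; dist_list_tmp.reverse()
  let dist_list_tmp := (pvAWhile q [q]).reverse
  -- for dist in dist_list_tmp: desc_list_tmp.append([i for i in name_list if i not in dist and i in desc_list])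
  let desc_list_tmp := dist_list_tmp.map
    (fun dist => name_list.filter (fun i => !(dist.contains i) && desc_list.contains i))
  -- for idx, element in enumerate(dist_list_tmp): if dist_list_tmp[idx] + desc_list_tmp[idx] == name_list: append both
  (dist_list_tmp.zip desc_list_tmp).foldl
    (fun acc p => if p.1 ++ p.2 == name_list then (acc.1 ++ [p.1], acc.2 ++ [p.2]) else acc)
    ([], [])

-- ===== PORT B =====
def list_distinctive_descriptive_alt (name_list : List String) (dist_list : List String) (desc_list : List String) : List (List String) × List (List String) :=
  -- eff = dist_list[:-1] if dist_list == name_list else dist_list  ([:-1] on a list = dropLast, exact)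
  let eff := if dist_list == name_list then dist_list.dropLast else dist_list
  -- desc = [w for w in name_list if w in desc_list]
  let desc0 := name_list.filter (fun w => desc_list.contains w)
  if eff.isEmpty then
    (if desc0 == name_list then ([[]], [desc0]) else ([], []))
  else
    -- for w in eff: dist = dist + [w]; desc = [x for x in desc if x != w]; if dist == name_list[:len(dist)] and desc == name_list[len(dist):]: append
    (eff.foldl
      (fun (st : List String × List String × (List (List String) × List (List String))) w =>
        let dist := st.1 ++ [w]
        let desc := st.2.1.filter (fun x => x != w)
        if dist == name_list.take dist.length && desc == name_list.drop dist.length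
        then (dist, desc, (st.2.2.1 ++ [dist], st.2.2.2 ++ [desc]))
        else (dist, desc, st.2.2))
      ([], desc0, ([], []))).2.2

-- ===== PRECONDITION & SPEC =====
-- Pre_ excludes only name_list = dist_list = [], where A raises IndexError (deque.pop() on an empty deque).
def Pre_list_distinctive_descriptive (name_list : List String) (dist_list : List String) (desc_list : List String) : Prop :=
  ¬ (name_list = [] ∧ dist_list = [])
instance (name_list : List String) (dist_list : List String) (desc_list : List String) : Decidable (Pre_list_distinctive_descriptive name_list dist_list desc_list) := by unfold Pre_list_distinctive_descriptive; infer_instance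

def pvWitness_list_distinctive_descriptive : List String × List String × List String :=
  (["a", "b"], ["a"], ["b"])

def Spec_list_distinctive_descriptive (name_list : List String) (dist_list : List String) (desc_list : List String) (out : List (List String) × List (List String)) : Prop := out = list_distinctive_descriptive_alt name_list dist_list desc_list
instance (name_list : List String) (dist_list : List String) (desc_list : List String) (out : List (List String) × List (List String)) : Decidable (Spec_list_distinctive_descriptive name_list dist_list desc_list out) := by unfold Spec_list_distinctive_descriptive; infer_instance

-- ===== CLAIM (what is proved, stated in full; the proofs are below) =====
def Claim_equal_list_distinctive_descriptive : Prop := ∀ (name_list : List String) (dist_list : List String) (desc_list : List String), Dom_list_distinctive_descriptive name_list dist_list desc_list → Pre_list_distinctive_descriptive name_list dist_list desc_list → Spec_list_distinctive_descriptive name_list dist_list desc_list (list_distinctive_descriptive name_list dist_list desc_list)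

-- ===== LEMMAS AND PROOFS =====

-- the loop body both programs' selection reduces to, on a full prefix 'dist'
def pvBody (nl sl : List String) (acc : List (List String) × List (List String)) (dist : List String) : List (List String) × List (List String) :=
  let desc := nl.filter (fun i => !(dist.contains i) && sl.contains i)
  if dist ++ desc == nl then (acc.1 ++ [dist], acc.2 ++ [desc]) else acc

-- the descriptive list A recomputes for a prefix
def pvF (nl sl dist : List String) : List String :=
  nl.filter (fun i => !(dist.contains i) && sl.contains i)

-- A's zip-with-its-own-map fold is a fold of pvBody over the prefix list
lemma pvA_fold (nl sl : List String) :
    ∀ (l : List (List String)) (init : List (List String) × List (List String)),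
      ((l.zip (l.map (fun dist => nl.filter (fun i => !(dist.contains i) && sl.contains i)))).foldl
        (fun acc p => if p.1 ++ p.2 == nl then (acc.1 ++ [p.1], acc.2 ++ [p.2]) else acc) init)
        = l.foldl (pvBody nl sl) init := by
  intro l
  induction l with
  | nil => intro init; rfl
  | cons x xs ih =>
    intro init
    simp only [List.map_cons, List.zip_cons_cons, List.foldl_cons]
    rw [ih]
    rfl

-- the while loop only appends to the accumulator
lemma pvAWhile_acc : ∀ (n : Nat) (q : List String), q.length ≤ n →
    ∀ tmp, pvAWhile q tmp = tmp ++ pvAWhile q [] := by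
  intro n
  induction n with
  | zero =>
    intro q hq tmp
    have h : ¬ q.length > 1 := by omega
    rw [pvAWhile, if_neg h, pvAWhile, if_neg h, List.append_nil]
  | succ n ih =>
    intro q hq tmp
    by_cases h : q.length > 1
    · rw [pvAWhile, if_pos h]
      conv_rhs => rw [pvAWhile, if_pos h]
      have hd : q.dropLast.length ≤ n := by
        have : q.dropLast.length = q.length - 1 := List.length_dropLast
        omega
      rw [ih q.dropLast hd (tmp ++ [q.dropLast]), ih q.dropLast hd ([] ++ [q.dropLast])]
      simp
    · rw [pvAWhile, if_neg h, pvAWhile, if_neg h, List.append_nil]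

-- reversed while-loop output = the proper prefixes of q, shortest first
lemma pvAWhile_rev : ∀ (n : Nat) (q : List String), q.length ≤ n →
    (pvAWhile q []).reverse = (List.range (q.length - 1)).map (fun i => q.take (i + 1)) := by
  intro n
  induction n with
  | zero =>
    intro q hq
    have h : ¬ q.length > 1 := by omega
    have h0 : q.length - 1 = 0 := by omega
    rw [pvAWhile, if_neg h, h0]
    simp
  | succ n ih =>
    intro q hq
    by_cases h : q.length > 1
    · rw [pvAWhile, if_pos h]
      have hlen : q.dropLast.length = q.length - 1 := List.length_dropLast
      have hd : q.dropLast.length ≤ n := by omega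
      rw [pvAWhile_acc n q.dropLast hd]
      simp only [List.reverse_append]
      rw [ih q.dropLast hd]
      have h1 : q.length - 1 = (q.length - 1 - 1) + 1 := by omega
      rw [h1, List.range_succ]
      simp only [List.map_append, List.map_cons, List.map_nil, hlen]
      congr 1
      · apply List.map_congr_left
        intro i hi
        simp only [List.mem_range] at hi
        rw [List.dropLast_eq_take, List.take_take]
        congr 1
        omega
      · simp only [List.reverse_cons, List.reverse_nil, List.nil_append, List.append_nil]
        rw [List.dropLast_eq_take, show q.length - 1 - 1 + 1 = q.length - 1 from by omega]
    · have h0 : q.length - 1 = 0 := by omega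
      rw [pvAWhile, if_neg h, h0]
      simp

-- the whole dist_list_tmp (reversed) = prefixes of q of lengths 1..len q, or [[]] when q = []
lemma pvAWhile_full (q : List String) :
    (pvAWhile q [q]).reverse
      = if q.length = 0 then [[]]
        else (List.range q.length).map (fun i => q.take (i + 1)) := by
  rw [pvAWhile_acc q.length q (le_refl _)]
  simp only [List.reverse_append]
  rw [pvAWhile_rev q.length q (le_refl _)]
  by_cases h : q.length = 0
  · simp_all [List.eq_nil_of_length_eq_zero h]
  · rw [if_neg h]
    have h1 : q.length = (q.length - 1) + 1 := by omega
    rw [h1, List.range_succ]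
    simp only [List.map_append, List.map_cons, List.map_nil, List.reverse_cons, List.reverse_nil,
      List.nil_append]
    congr 1
    rw [List.take_of_length_le (by omega)]

-- B's incremental shrink step computes A's recomputed filter for the extended prefix
lemma pvF_step (nl sl dist : List String) (w : String) :
    (pvF nl sl dist).filter (fun x => x != w) = pvF nl sl (dist ++ [w]) := by
  unfold pvF
  rw [List.filter_filter]
  apply List.filter_congr
  intro i _
  by_cases h1 : dist.contains i <;> by_cases h2 : sl.contains i <;> by_cases h3 : i = w <;>
    simp_all

-- B's head/tail test = A's concatenation test
lemma pv_test_iff (nl dist desc : List String) :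
    (dist == nl.take dist.length && desc == nl.drop dist.length) = (dist ++ desc == nl) := by
  rw [Bool.eq_iff_iff]
  simp only [Bool.and_eq_true, beq_iff_eq]
  constructor
  · rintro ⟨h1, h2⟩
    rw [h1, h2, List.take_append_drop]
  · intro h
    subst h
    constructor
    · rw [List.take_left]
    · rw [List.drop_left]

-- B's incremental fold = fold of pvBody over the extended prefixes
lemma pvB_fold (nl sl : List String) :
    ∀ (ws dist0 : List String) (acc : List (List String) × List (List String)),
      ((ws.foldl
        (fun (st : List String × List String × (List (List String) × List (List String))) w =>
          let dist := st.1 ++ [w]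
          let desc := st.2.1.filter (fun x => x != w)
          if dist == nl.take dist.length && desc == nl.drop dist.length
          then (dist, desc, (st.2.2.1 ++ [dist], st.2.2.2 ++ [desc]))
          else (dist, desc, st.2.2))
        (dist0, pvF nl sl dist0, acc)).2.2)
      = ((List.range ws.length).map (fun i => dist0 ++ ws.take (i + 1))).foldl (pvBody nl sl) acc := by
  intro ws
  induction ws with
  | nil => intro dist0 acc; rfl
  | cons w rest ih =>
    intro dist0 acc
    simp only [List.foldl_cons, List.length_cons]
    rw [List.range_succ_eq_map]
    simp only [List.map_cons, List.map_map, List.foldl_cons]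
    have hstep := pvF_step nl sl dist0 w
    have hbody : (if (dist0 ++ [w]) == nl.take (dist0 ++ [w]).length &&
          ((pvF nl sl dist0).filter (fun x => x != w)) == nl.drop (dist0 ++ [w]).length
        then (dist0 ++ [w], (pvF nl sl dist0).filter (fun x => x != w),
              (acc.1 ++ [dist0 ++ [w]], acc.2 ++ [(pvF nl sl dist0).filter (fun x => x != w)]))
        else (dist0 ++ [w], (pvF nl sl dist0).filter (fun x => x != w), acc))
        = (dist0 ++ [w], pvF nl sl (dist0 ++ [w]), pvBody nl sl acc (dist0 ++ [w])) := by
      rw [hstep]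
      simp only [pvBody, pvF, pv_test_iff]
      split <;> rfl
    rw [hbody, ih]
    have hmap : List.map (fun i => dist0 ++ [w] ++ List.take (i + 1) rest) (List.range rest.length)
        = List.map ((fun i => dist0 ++ List.take (i + 1) (w :: rest)) ∘ Nat.succ) (List.range rest.length) := by
      apply List.map_congr_left
      intro i _
      simp [Function.comp, List.take_succ_cons, List.append_assoc]
    rw [hmap]
    simp
-- ===== VERDICT (by name: the statement is the Claim_ definition above) =====
theorem list_distinctive_descriptive_spec : Claim_equal_list_distinctive_descriptive := by
  unfold Claim_equal_list_distinctive_descriptive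
  intro nl dl sl _ hpre
  unfold Spec_list_distinctive_descriptive
  unfold list_distinctive_descriptive list_distinctive_descriptive_alt
  simp only []
  rw [pvA_fold, pvAWhile_full]
  set q := if dl == nl then dl.dropLast else dl with hq
  have hF0 : nl.filter (fun w => sl.contains w) = pvF nl sl [] := by
    unfold pvF
    apply List.filter_congr
    intro i _
    simp
  by_cases h0 : q.length = 0
  · have hqe : q = [] := List.eq_nil_of_length_eq_zero h0
    rw [if_pos h0, if_pos (by simp [hqe])]
    have hfe : List.filter (fun i => !(([] : List String).contains i) && sl.contains i) nl
        = nl.filter (fun w => sl.contains w) := by simp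
    simp only [List.foldl_cons, List.foldl_nil, pvBody, List.nil_append, hfe]
  · rw [if_neg h0, if_neg (by simp [List.isEmpty_iff]; intro h; simp [h] at h0)]
    rw [hF0, pvB_fold nl sl q [] ([], [])]
    congr 1
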